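-- pv_equiv track=rewrite | github.com/pypi-data/pypi-mirror-398 | packages/dazzle-preserve/dazzle_preserve-0.7.3.tar.gz/dazzle_preserve-0.7.3/preservelib/path_warnings.py | find_path_overlap
-- ===== SOURCE A (Python) =====
-- from typing import Optional, List, Tuple, NamedTuple
--
-- def find_path_overlap(source_parts: List[str], dest_parts: List[str]) -> int:
--     """Find how many trailing components of dest match leading components of source.
--
--     Returns the number of overlapping components.
--
--     Example:
--         source: ['c', 'users', 'extreme', '.cache', 'huggingface', 'hub']
--         dest:   ['e', 'c', 'users', 'extreme', '.cache', 'huggingface']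
--
--         dest ends with: ['c', 'users', 'extreme', '.cache', 'huggingface']
--         source starts with: ['c', 'users', 'extreme', '.cache', 'huggingface', 'hub']
--         overlap = 5 components
--     """
--     if not source_parts or not dest_parts:
--         return 0
--
--     max_overlap = min(len(source_parts), len(dest_parts))
--
--     for overlap_len in range(max_overlap, 0, -1):
--         # Check if the last overlap_len parts of dest match the first overlap_len parts of source
--         dest_suffix = dest_parts[-overlap_len:]
--         source_prefix = source_parts[:overlap_len]
--
--         if dest_suffix == source_prefix:
--             return overlap_len
--
--     return 0
-- ===== SOURCE B (Python) =====
-- def find_path_overlap(source_parts, dest_parts):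
--     """KMP: the answer is the longest border of source + [sentinel] + dest,
--     computed in O(n) with the prefix function."""
--     if not source_parts or not dest_parts:
--         return 0
--     t = list(source_parts) + [None] + list(dest_parts)
--     pi = [0] * len(t)
--     k = 0
--     for i in range(1, len(t)):
--         while k > 0 and t[i] != t[k]:
--             k = pi[k - 1]
--         if t[i] == t[k]:
--             k += 1
--         pi[i] = k
--     return pi[-1]
-- ===== Notes on version B (the rewrite author's own statement) =====
-- stated objective: faster
-- what changed: Replaces A's descending scan, which slices and compares up to min(len) components at each candidate overlap (quadratic), by the KMP prefix function computed once over source + [None sentinel] + dest, returning its last value (linear).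
import Mathlib
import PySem

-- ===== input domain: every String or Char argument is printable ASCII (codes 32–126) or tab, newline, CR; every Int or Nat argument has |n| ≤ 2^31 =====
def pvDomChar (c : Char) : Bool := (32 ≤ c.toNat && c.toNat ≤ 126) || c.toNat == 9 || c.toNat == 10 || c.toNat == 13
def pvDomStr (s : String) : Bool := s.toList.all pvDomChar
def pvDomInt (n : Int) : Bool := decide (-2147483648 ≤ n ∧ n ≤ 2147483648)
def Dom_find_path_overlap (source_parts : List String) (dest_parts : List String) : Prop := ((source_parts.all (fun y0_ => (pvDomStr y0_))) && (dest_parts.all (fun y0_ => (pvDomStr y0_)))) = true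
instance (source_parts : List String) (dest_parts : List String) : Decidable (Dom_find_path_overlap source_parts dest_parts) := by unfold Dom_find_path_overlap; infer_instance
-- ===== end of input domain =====

-- B replaces A's quadratic descending scan (each step slices and compares up to k
-- components) by the linear KMP prefix function on source ++ [separator] ++ dest.

-- ===== PORT A =====
-- 'for overlap_len in range(max_overlap, 0, -1): … return overlap_len' as recursion on the counter
def goA (source_parts dest_parts : List String) : Nat → Int
  | 0 => 0
  | k+1 =>
      if PySem.List.slice dest_parts (some (-((k+1 : Nat) : Int))) none
           = PySem.List.slice source_parts none (some ((k+1 : Nat) : Int))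
      then ((k+1 : Nat) : Int)
      else goA source_parts dest_parts k

def find_path_overlap (source_parts : List String) (dest_parts : List String) : Int :=
  if source_parts = [] ∨ dest_parts = [] then 0
  else goA source_parts dest_parts (min source_parts.length dest_parts.length)

-- ===== PORT B =====
-- 'while k > 0 and t[i] != t[k]: k = pi[k-1]'.  The 'min … k' only makes the recursion
-- structurally decreasing; pi[k-1] ≤ k-1 always holds (proved below), so it never changes the value.
def kmpFall (t : List (Option String)) (pi : List Nat) (c : Option String) : Nat → Nat
  | 0 => 0
  | k+1 =>
      if t.getD (k+1) none = c then k+1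
      else kmpFall t pi c (min (pi.getD k 0) k)
  termination_by k => k
  decreasing_by omega

-- one iteration of 'for i in range(1, len(t))': fall back, extend on match, append pi[i]
def kmpStep (t : List (Option String)) (st : List Nat × Nat) (i : Nat) : List Nat × Nat :=
  let k1 := kmpFall t st.1 (t.getD i none) st.2
  let k2 := if t.getD i none = t.getD k1 none then k1 + 1 else k1
  (st.1 ++ [k2], k2)

def find_path_overlap_alt (source_parts : List String) (dest_parts : List String) : Int :=
  if source_parts = [] ∨ dest_parts = [] then 0
  else
    let t := source_parts.map some ++ [none] ++ dest_parts.map some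
    let pi := ((List.range' 1 (t.length - 1)).foldl (kmpStep t) ([0], 0)).1
    ((pi.getD (pi.length - 1) 0 : Nat) : Int)   -- pi[-1]; pi is nonempty here

-- ===== PRECONDITION & SPEC =====
def Spec_find_path_overlap (source_parts : List String) (dest_parts : List String) (out : Int) : Prop := out = find_path_overlap_alt source_parts dest_parts
instance (source_parts : List String) (dest_parts : List String) (out : Int) : Decidable (Spec_find_path_overlap source_parts dest_parts out) := by unfold Spec_find_path_overlap; infer_instance

-- ===== CLAIM (what is proved, stated in full; the proofs are below) =====
def Claim_equal_find_path_overlap : Prop := ∀ (source_parts : List String) (dest_parts : List String), Dom_find_path_overlap source_parts dest_parts → Spec_find_path_overlap source_parts dest_parts (find_path_overlap source_parts dest_parts)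

-- ===== LEMMAS AND PROOFS =====

-- the overlap predicate A tests: last k of dest = first k of source
abbrev pvP (s d : List String) (k : Nat) : Prop := d.drop (d.length - k) = s.take k

-- border predicate: the first k elements of t are also its last k elements
abbrev pvBord (t : List (Option String)) (k : Nat) : Prop := t.take k = t.drop (t.length - k)

-- length of the longest proper border
def pvB (t : List (Option String)) : Nat := Nat.findGreatest (pvBord t) (t.length - 1)

lemma pv_findGreatest_eq {P : Nat → Prop} [DecidablePred P] {b m : Nat}
    (hP : P m) (hmb : m ≤ b) (hmax : ∀ j, j ≤ b → P j → j ≤ m) :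
    Nat.findGreatest P b = m := by
  refine le_antisymm ?_ (Nat.le_findGreatest hmb hP)
  rcases Nat.eq_zero_or_pos (Nat.findGreatest P b) with h0 | h0
  · omega
  · exact hmax _ (Nat.findGreatest_le b) (Nat.findGreatest_of_ne_zero rfl (by omega))

lemma pvBord_zero (t : List (Option String)) : pvBord t 0 := by
  simp [pvBord]

lemma pvBord_take_iff {t : List (Option String)} {k j : Nat}
    (hk : k ≤ t.length) (hQ : pvBord t k) (hj : j ≤ k) :
    pvBord (t.take k) j ↔ pvBord t j := by
  unfold pvBord
  rw [List.take_take, List.length_take, hQ, List.drop_drop]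
  have h1 : min j k = j := Nat.min_eq_left hj
  have h2 : t.length - k + (min k t.length - j) = t.length - j := by omega
  rw [h1, h2]

lemma pv_take_succ {t : List (Option String)} {i : Nat} (hi : i < t.length) :
    t.take (i+1) = t.take i ++ [t.getD i none] := by
  rw [List.take_add_one]
  simp [List.getElem?_eq_getElem hi, List.getD_eq_getElem?_getD]

lemma pvBord_concat {l : List (Option String)} {c : Option String} {j : Nat}
    (hj : j + 1 ≤ l.length) :
    pvBord (l ++ [c]) (j+1) ↔ pvBord l j ∧ l.getD j none = c := by
  unfold pvBord
  have hjl : j < l.length := hj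
  have h1 : (l ++ [c]).take (j+1) = l.take j ++ [l.getD j none] := by
    rw [List.take_append, pv_take_succ hjl, Nat.sub_eq_zero_of_le hj]
    simp
  have hidx : (l ++ [c]).length - (j+1) = l.length - j := by simp
  have h2 : (l ++ [c]).drop (l.length - j) = l.drop (l.length - j) ++ [c] := by
    have hz : l.length - j - l.length = 0 := by omega
    rw [List.drop_append, hz, List.drop_zero]
  rw [h1, hidx, h2, List.append_singleton_inj]

lemma pvB_le (t : List (Option String)) : pvB t ≤ t.length - 1 := Nat.findGreatest_le _

lemma pvB_bord (t : List (Option String)) : pvBord t (pvB t) := by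
  rcases Nat.eq_zero_or_pos (pvB t) with h0 | h0
  · rw [h0]; exact pvBord_zero t
  · exact Nat.findGreatest_of_ne_zero rfl (by omega)

lemma pv_getD_take {t : List (Option String)} {i j : Nat} (h : j < i) :
    (t.take i).getD j none = t.getD j none := by
  simp [List.getD_eq_getElem?_getD, List.getElem?_take_of_lt h]

lemma kmpFall_zero (t : List (Option String)) (pi : List Nat) (c : Option String) :
    kmpFall t pi c 0 = 0 := by
  rw [kmpFall]

lemma kmpFall_succ (t : List (Option String)) (pi : List Nat) (c : Option String) (k : Nat) :
    kmpFall t pi c (k+1)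
      = if t.getD (k+1) none = c then k+1 else kmpFall t pi c (min (pi.getD k 0) k) := by
  rw [kmpFall]

lemma kmpFall_spec (t : List (Option String)) (i : Nat) (hin : i ≤ t.length)
    (pi : List Nat) (hpi : pi.length = i)
    (H : ∀ m, m < i → pi.getD m 0 = pvB (t.take (m+1)))
    (c : Option String) (k0 : Nat) (hk0 : k0 ≤ i) (hb : pvBord (t.take i) k0) :
    pvBord (t.take i) (kmpFall t pi c k0) ∧ kmpFall t pi c k0 ≤ k0 ∧
      (kmpFall t pi c k0 ≠ 0 → t.getD (kmpFall t pi c k0) none = c) ∧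
      (∀ j, j ≤ k0 → pvBord (t.take i) j → t.getD j none = c → j ≤ kmpFall t pi c k0) := by
  revert hk0 hb
  induction k0 using Nat.strong_induction_on with
  | _ k0 IH =>
    intro hk0 hb
    cases k0 with
    | zero =>
      rw [kmpFall_zero]
      exact ⟨pvBord_zero _, le_refl _, fun h => absurd rfl h, fun j hj _ _ => hj⟩
    | succ k =>
      rw [kmpFall_succ]
      by_cases hc : t.getD (k+1) none = c
      · rw [if_pos hc]
        exact ⟨hb, le_refl _, fun _ => hc, fun j hj _ _ => hj⟩
      · rw [if_neg hc]
        have hki : k < i := by omega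
        have hp : pi.getD k 0 = pvB (t.take (k+1)) := H k hki
        have hlen1 : (t.take (k+1)).length = k + 1 := by
          rw [List.length_take]; omega
        have hple : pi.getD k 0 ≤ k := by
          have := pvB_le (t.take (k+1)); omega
        have hmin : min (pi.getD k 0) k = pi.getD k 0 := Nat.min_eq_left hple
        rw [hmin]
        have htk : (t.take i).take (k+1) = t.take (k+1) := by
          rw [List.take_take]; congr 1; omega
        have hlenQ : (t.take i).length = i := by rw [List.length_take]; omega
        have hbp' : pvBord (t.take (k+1)) (pi.getD k 0) := by
          rw [hp]; exact pvB_bord _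
        have hiff : ∀ j, j ≤ k + 1 → (pvBord (t.take (k+1)) j ↔ pvBord (t.take i) j) := by
          intro j hjk
          rw [← htk]
          exact pvBord_take_iff (by omega) hb hjk
        have hbQ : pvBord (t.take i) (pi.getD k 0) := (hiff _ (by omega)).1 hbp'
        obtain ⟨ih1, ih2, ih3, ih4⟩ := IH (pi.getD k 0) (by omega) (by omega) hbQ
        refine ⟨ih1, by omega, ih3, ?_⟩
        intro j hj hbj hcj
        have hjne : j ≠ k + 1 := by rintro rfl; exact hc hcj
        have hjQ : pvBord (t.take (k+1)) j := (hiff j (by omega)).2 hbj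
        have hjp : j ≤ pi.getD k 0 := by
          rw [hp]; unfold pvB
          exact Nat.le_findGreatest (by omega) hjQ
        exact ih4 j hjp hbj hcj

lemma kmpStep_spec (t : List (Option String)) (i : Nat) (h1 : 1 ≤ i) (hi : i < t.length)
    (pi : List Nat) (hpi : pi.length = i)
    (H : ∀ m, m < i → pi.getD m 0 = pvB (t.take (m+1))) :
    kmpStep t (pi, pvB (t.take i)) i = (pi ++ [pvB (t.take (i+1))], pvB (t.take (i+1))) := by
  have hlenQ : (t.take i).length = i := by rw [List.length_take]; omega
  have hk0le : pvB (t.take i) ≤ i - 1 := by have := pvB_le (t.take i); omega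
  have hbQ : pvBord (t.take i) (pvB (t.take i)) := pvB_bord _
  obtain ⟨f1, f2, f3, f4⟩ := kmpFall_spec t i (le_of_lt hi) pi hpi H (t.getD i none)
    (pvB (t.take i)) (by omega) hbQ
  set r := kmpFall t pi (t.getD i none) (pvB (t.take i)) with hr
  have hts : t.take (i+1) = t.take i ++ [t.getD i none] := pv_take_succ hi
  have hlen1 : (t.take (i+1)).length = i + 1 := by rw [List.length_take]; omega
  have E : ∀ j, j + 1 ≤ i →
      (pvBord (t.take (i+1)) (j+1) ↔ pvBord (t.take i) j ∧ t.getD j none = t.getD i none) := by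
    intro j hj
    rw [hts, pvBord_concat (by omega : j + 1 ≤ (t.take i).length), pv_getD_take (by omega)]
  have hgoal : (if t.getD i none = t.getD r none then r + 1 else r) = pvB (t.take (i+1)) := by
    unfold pvB
    simp only [hlen1, Nat.add_sub_cancel]
    by_cases hr0 : r = 0
    · rw [hr0]
      by_cases hc0 : t.getD i none = t.getD 0 none
      · rw [if_pos hc0]
        refine (pv_findGreatest_eq ((E 0 (by omega)).2 ⟨pvBord_zero _, hc0.symm⟩)
          (by omega) ?_).symm
        intro j hj hbj
        cases j with
        | zero => omega
        | succ j' =>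
          obtain ⟨hb', hc'⟩ := (E j' (by omega)).1 hbj
          have hj'B : j' ≤ pvB (t.take i) := by
            unfold pvB; exact Nat.le_findGreatest (by omega) hb'
          have := f4 j' hj'B hb' hc'
          omega
      · rw [if_neg hc0]
        refine (pv_findGreatest_eq (pvBord_zero _) (by omega) ?_).symm
        intro j hj hbj
        cases j with
        | zero => omega
        | succ j' =>
          obtain ⟨hb', hc'⟩ := (E j' (by omega)).1 hbj
          have hj'B : j' ≤ pvB (t.take i) := by
            unfold pvB; exact Nat.le_findGreatest (by omega) hb'
          have hjr := f4 j' hj'B hb' hc'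
          have hj0 : j' = 0 := by omega
          rw [hj0] at hc'
          exact absurd hc'.symm hc0
    · have hcr : t.getD r none = t.getD i none := f3 hr0
      rw [if_pos hcr.symm]
      refine (pv_findGreatest_eq ((E r (by omega)).2 ⟨f1, hcr⟩) (by omega) ?_).symm
      intro j hj hbj
      cases j with
      | zero => omega
      | succ j' =>
        obtain ⟨hb', hc'⟩ := (E j' (by omega)).1 hbj
        have hj'B : j' ≤ pvB (t.take i) := by
          unfold pvB; exact Nat.le_findGreatest (by omega) hb'
        have := f4 j' hj'B hb' hc'
        omega
  unfold kmpStep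
  simp only []
  rw [← hr, hgoal]

lemma kmpPi_inv (t : List (Option String)) (m : Nat) (hm : 1 + m ≤ t.length) :
    (List.range' 1 m).foldl (kmpStep t) ([0], 0)
      = ((List.range (m+1)).map (fun j => pvB (t.take (j+1))), pvB (t.take (m+1))) := by
  induction m with
  | zero =>
    have h1 : (t.take 1).length = 1 := by rw [List.length_take]; omega
    have hB : pvB (t.take 1) = 0 := by
      unfold pvB
      simp [h1]
    simp [hB]
  | succ m IH =>
    have hm' : 1 + m ≤ t.length := by omega
    rw [List.range'_1_concat, List.foldl_append, IH hm', List.foldl_cons, List.foldl_nil]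
    have hstep := kmpStep_spec t (1+m) (by omega) (by omega)
      ((List.range (m+1)).map (fun j => pvB (t.take (j+1)))) (by simp; omega)
      (fun j hj => by
        simp [List.getD_eq_getElem?_getD, List.getElem?_map,
          List.getElem?_range (show j < m + 1 by omega)])
    have harg : 1 + m = m + 1 := by omega
    rw [harg] at hstep
    rw [show (1:Nat) + m = m + 1 from harg, hstep]
    rw [List.range_succ (n := m+1)]
    simp [Nat.add_assoc]

lemma pv_take_lo (s d : List String) {k : Nat} (hks : k ≤ s.length) :
    (s.map some ++ [none] ++ d.map some).take k = (s.take k).map some := by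
  rw [List.take_append, List.take_append]
  simp [Nat.sub_eq_zero_of_le hks,
    Nat.sub_eq_zero_of_le (show k ≤ s.length + 1 by omega)]

lemma pv_drop_lo (s d : List String) {k : Nat} (hkd : k ≤ d.length) :
    (s.map some ++ [none] ++ d.map some).drop ((s.map some ++ [none] ++ d.map some).length - k)
      = (d.drop (d.length - k)).map some := by
  rw [List.drop_append, List.drop_append]
  simp only [List.length_append, List.length_map, List.length_cons, List.length_nil]
  have e1 : List.drop (s.length + (0+1) + d.length - k) (List.map some s) = [] :=
    List.drop_eq_nil_of_le (by simp; omega)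
  have e2 : List.drop (s.length + (0+1) + d.length - k - s.length) [(none : Option String)] = [] :=
    List.drop_eq_nil_of_le (by simp; omega)
  have e3 : s.length + (0+1) + d.length - k - (s.length + (0+1)) = d.length - k := by omega
  rw [e1, e2, e3, List.map_drop]
  simp

lemma pv_take_hi (s d : List String) {k : Nat} (hka : s.length < k) :
    (s.map some ++ [none] ++ d.map some).take k
      = s.map some ++ [none] ++ (d.map some).take (k - (s.length + 1)) := by
  rw [List.take_append]
  rw [List.take_of_length_le (by simp; omega)]
  congr 2
  simp

lemma pv_drop_hi (s d : List String) {k : Nat} (hkd : d.length < k) :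
    (s.map some ++ [none] ++ d.map some).drop ((s.map some ++ [none] ++ d.map some).length - k)
      = (s.map some).drop (s.length + 1 + d.length - k) ++ [none] ++ d.map some := by
  rw [List.drop_append, List.drop_append]
  simp only [List.length_append, List.length_map, List.length_cons, List.length_nil]
  have e2 : s.length + (0+1) + d.length - k - s.length = 0 := by omega
  have e3 : s.length + (0+1) + d.length - k - (s.length + (0+1)) = 0 := by omega
  rw [e2, e3, List.drop_zero, List.drop_zero]

lemma pvBord_le_min {s d : List String} {k : Nat}
    (hk : k ≤ (s.map some ++ [none] ++ d.map some).length - 1)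
    (h : pvBord (s.map some ++ [none] ++ d.map some) k) :
    k ≤ min s.length d.length := by
  have hlen : (s.map some ++ [none] ++ d.map some).length = s.length + 1 + d.length := by simp; try omega
  by_contra hcon
  unfold pvBord at h
  by_cases hka : s.length < k
  · by_cases hkd : d.length < k
    · rw [pv_take_hi s d hka, pv_drop_hi s d hkd] at h
      have h9 := congrArg (fun l => l[k - d.length - 1]?) h
      simp only [] at h9
      rw [List.getElem?_append_left (by simp; omega),
          List.getElem?_append_left (by simp; omega),
          List.getElem?_append_left (by simp; omega),
          List.getElem?_append_right (by simp; omega)] at h9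
      simp [List.getElem?_map,
        List.getElem?_eq_getElem (show k - d.length - 1 < s.length by omega)] at h9
      have hzero : k - d.length - 1 - (s.length - (s.length + 1 + d.length - k)) = 0 := by omega
      rw [hzero] at h9
      simp at h9
    · rw [pv_take_hi s d hka, pv_drop_lo s d (by omega)] at h
      have hmem : (none : Option String)
          ∈ s.map some ++ [none] ++ (d.map some).take (k - (s.length + 1)) := by simp
      rw [h] at hmem
      rcases List.mem_map.1 hmem with ⟨x, -, hx⟩
      exact Option.some_ne_none x hx
  · have hkd : d.length < k := by omega
    rw [pv_take_lo s d (by omega), pv_drop_hi s d hkd] at h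
    have hmem : (none : Option String)
        ∈ (s.map some).drop (s.length + 1 + d.length - k) ++ [none] ++ d.map some := by simp
    rw [← h] at hmem
    rcases List.mem_map.1 hmem with ⟨x, -, hx⟩
    exact Option.some_ne_none x hx

lemma pvBord_iff {s d : List String} {k : Nat} (hk : k ≤ min s.length d.length) :
    pvBord (s.map some ++ [none] ++ d.map some) k ↔ pvP s d k := by
  have hks : k ≤ s.length := le_trans hk (Nat.min_le_left _ _)
  have hkd : k ≤ d.length := le_trans hk (Nat.min_le_right _ _)
  unfold pvBord pvP
  rw [pv_take_lo s d hks, pv_drop_lo s d hkd]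
  constructor
  · intro h
    exact ((List.map_injective_iff.mpr (Option.some_injective _)) h).symm
  · intro h
    rw [h]

lemma pvB_eq (s d : List String) :
    pvB (s.map some ++ [none] ++ d.map some)
      = Nat.findGreatest (pvP s d) (min s.length d.length) := by
  have hlen : (s.map some ++ [none] ++ d.map some).length = s.length + 1 + d.length := by simp; try omega
  unfold pvB
  have hmle : Nat.findGreatest (pvP s d) (min s.length d.length) ≤ min s.length d.length :=
    Nat.findGreatest_le _
  apply pv_findGreatest_eq
  · rcases Nat.eq_zero_or_pos (Nat.findGreatest (pvP s d) (min s.length d.length)) with h0 | h0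
    · rw [h0]; exact pvBord_zero _
    · exact (pvBord_iff hmle).2 (Nat.findGreatest_of_ne_zero rfl (by omega))
  · omega
  · intro j hj hbj
    have hjm : j ≤ min s.length d.length := pvBord_le_min hj hbj
    exact Nat.le_findGreatest hjm ((pvBord_iff hjm).1 hbj)

lemma goA_eq (s d : List String) (m : Nat) :
    goA s d m = ((Nat.findGreatest (pvP s d) m : Nat) : Int) := by
  induction m with
  | zero => simp [goA]
  | succ k IH =>
    rw [goA, PySem.List.slice_from_neg_natCast d (k+1) (by omega),
        PySem.List.slice_to_natCast s (k+1), Nat.findGreatest_succ]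
    by_cases h : pvP s d (k+1)
    · rw [if_pos h, if_pos h]
    · rw [if_neg h, if_neg h, IH]

lemma pv_getD_last_map_range (f : Nat → Nat) (n : Nat) (hn : 0 < n) :
    ((List.range n).map f).getD (((List.range n).map f).length - 1) 0 = f (n-1) := by
  rw [List.length_map, List.length_range, List.getD_eq_getElem?_getD, List.getElem?_map,
    List.getElem?_range (show n - 1 < n by omega)]
  simp

lemma alt_eq (s d : List String) (hs : s ≠ []) (hd : d ≠ []) :
    find_path_overlap_alt s d = ((pvB (s.map some ++ [none] ++ d.map some) : Nat) : Int) := by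
  unfold find_path_overlap_alt
  rw [if_neg (by simp [hs, hd])]
  have hlen : (s.map some ++ [none] ++ d.map some).length = s.length + 1 + d.length := by simp; try omega
  have hs1 : 0 < s.length := List.length_pos_iff.mpr hs
  have hinv := kmpPi_inv (s.map some ++ [none] ++ d.map some)
    ((s.map some ++ [none] ++ d.map some).length - 1) (by omega)
  simp only [hinv]
  rw [pv_getD_last_map_range _ _ (by omega)]
  have hm1 : (s.map some ++ [none] ++ d.map some).length - 1 + 1
      = (s.map some ++ [none] ++ d.map some).length := by omega
  simp only [hm1, List.take_length]

-- ===== VERDICT (by name: the statement is the Claim_ definition above) =====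
theorem find_path_overlap_spec : Claim_equal_find_path_overlap := by
  intro s d _
  unfold Spec_find_path_overlap find_path_overlap
  by_cases h : s = [] ∨ d = []
  · rw [if_pos h]
    unfold find_path_overlap_alt
    rw [if_pos h]
  · obtain ⟨hs, hd⟩ := not_or.mp h
    rw [if_neg (by simp [hs, hd])]
    rw [alt_eq s d hs hd, goA_eq, ← pvB_eq]
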